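-- pv_equiv track=rewrite | github.com/pypi-data/pypi-mirror-390 | packages/polykit/polykit-0.14.5.tar.gz/polykit-0.14.5/src/polykit/time/time.py | convert_sec_to_interval
-- ===== SOURCE A (Python) =====
-- def convert_sec_to_interval(interval: int, omit_one: bool = False) -> str:
--     """Convert a time interval in seconds to a human-readable interval string.
--
--     Args:
--         interval: The time interval in seconds.
--         omit_one: If True, the string will not include the unit if the value is 1.
--
--     Returns:
--         A human-readable string representation of the time interval.
--     """
--     days, remainder = divmod(interval, 86400)
--     hours, remainder = divmod(remainder, 3600)
--     minutes, seconds = divmod(remainder, 60)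
--
--     parts = []
--     if days:
--         parts.append(f"{days} day{'s' if days != 1 else ''}")
--     if hours:
--         parts.append(f"{hours} hour{'s' if hours != 1 else ''}")
--     if minutes:
--         parts.append(f"{minutes} minute{'s' if minutes != 1 else ''}")
--     if seconds or not parts:
--         parts.append(f"{seconds} second{'s' if seconds != 1 else ''}")
--
--     if omit_one:
--         parts = [p.replace("1 ", "") if p.startswith("1 ") else p for p in parts]
--
--     return " and ".join(parts)
-- ===== SOURCE B (Python) =====
-- RATIOS = [("second", 60), ("minute", 60), ("hour", 24)]
--
--
-- def _fmt(value: int, name: str, omit_one: bool) -> str: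
--     if value == 1:
--         return name if omit_one else f"1 {name}"
--     return f"{value} {name}s"
--
--
-- def convert_sec_to_interval(interval: int, omit_one: bool = False) -> str:
--     def go(n: int, i: int) -> list:
--         # Recurse from the smallest unit upward: peel off this unit's share,
--         # let the recursion render everything above it, then append this part.
--         if i == len(RATIOS):
--             return [_fmt(n, "day", omit_one)] if n else []
--         name, ratio = RATIOS[i]
--         n, r = divmod(n, ratio)
--         return go(n, i + 1) + ([_fmt(r, name, omit_one)] if r else [])
--
--     parts = go(interval, 0)
--     return " and ".join(parts) if parts else "0 seconds"
-- ===== Notes on version B (the rewrite author's own statement) =====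
-- stated objective: alternative
-- what changed: Replaces A's top-down cascade of four unrolled divmods by absolute unit sizes (86400/3600/60) plus an omit_one startswith/replace post-pass with a bottom-up recursion over unit ratios (60, 60, 24) that peels off the smallest unit first, builds the parts list back-to-front through recursion returns, and formats each label (including the omit_one case) up front.
import Mathlib
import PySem

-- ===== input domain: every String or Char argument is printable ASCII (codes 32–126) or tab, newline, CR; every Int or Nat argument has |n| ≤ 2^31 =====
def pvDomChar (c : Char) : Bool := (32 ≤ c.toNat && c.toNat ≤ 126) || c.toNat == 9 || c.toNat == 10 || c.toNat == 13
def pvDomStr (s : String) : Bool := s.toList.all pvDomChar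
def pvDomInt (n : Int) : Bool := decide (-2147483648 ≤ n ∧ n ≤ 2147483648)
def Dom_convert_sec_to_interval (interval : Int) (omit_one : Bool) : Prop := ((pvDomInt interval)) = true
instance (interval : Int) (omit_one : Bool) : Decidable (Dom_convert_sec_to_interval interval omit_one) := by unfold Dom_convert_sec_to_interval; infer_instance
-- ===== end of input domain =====

-- B replaces A's top-down cascade of divmods by unit sizes plus an omit_one replace() post-pass
-- with a bottom-up recursion over unit ratios (60, 60, 24) that builds the parts list
-- back-to-front and formats each label correctly up front (objective: alternative).

-- ===== PORT A =====
def convert_sec_to_interval (interval : Int) (omit_one : Bool) : String :=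
  let days := PySem.Int.floordiv interval 86400
  let remainder := PySem.Int.mod interval 86400
  let hours := PySem.Int.floordiv remainder 3600
  let remainder := PySem.Int.mod remainder 3600
  let minutes := PySem.Int.floordiv remainder 60
  let seconds := PySem.Int.mod remainder 60
  let parts : List String := []
  let parts := if days ≠ 0 then parts ++ [PySem.Int.toStr days ++ " day" ++ (if days ≠ 1 then "s" else "")] else parts
  let parts := if hours ≠ 0 then parts ++ [PySem.Int.toStr hours ++ " hour" ++ (if hours ≠ 1 then "s" else "")] else parts
  let parts := if minutes ≠ 0 then parts ++ [PySem.Int.toStr minutes ++ " minute" ++ (if minutes ≠ 1 then "s" else "")] else parts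
  let parts := if seconds ≠ 0 ∨ parts = [] then parts ++ [PySem.Int.toStr seconds ++ " second" ++ (if seconds ≠ 1 then "s" else "")] else parts
  let parts := if omit_one then parts.map (fun p => if PySem.Str.startswith p "1 " then PySem.Str.replace p "1 " "" else p) else parts
  PySem.Str.join " and " parts

-- ===== PORT B =====
def pvFmt (value : Int) (name : String) (omit_one : Bool) : String :=
  if value = 1 then (if omit_one then name else "1 " ++ name)
  else PySem.Int.toStr value ++ " " ++ name ++ "s"

def pvRatios : List (String × Int) := [("second", 60), ("minute", 60), ("hour", 24)]

def pvGo (omit_one : Bool) : Int → List (String × Int) → List String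
  | n, [] => if n ≠ 0 then [pvFmt n "day" omit_one] else []
  | n, (name, ratio) :: rest =>
      let q := PySem.Int.floordiv n ratio
      let r := PySem.Int.mod n ratio
      pvGo omit_one q rest ++ (if r ≠ 0 then [pvFmt r name omit_one] else [])

def convert_sec_to_interval_alt (interval : Int) (omit_one : Bool) : String :=
  let parts := pvGo omit_one interval pvRatios
  if parts ≠ [] then PySem.Str.join " and " parts else "0 seconds"

-- ===== PRECONDITION & SPEC =====
def Spec_convert_sec_to_interval (interval : Int) (omit_one : Bool) (out : String) : Prop := out = convert_sec_to_interval_alt interval omit_one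
instance (interval : Int) (omit_one : Bool) (out : String) : Decidable (Spec_convert_sec_to_interval interval omit_one out) := by unfold Spec_convert_sec_to_interval; infer_instance

-- ===== CLAIM (what is proved, stated in full; the proofs are below) =====
def Claim_equal_convert_sec_to_interval : Prop := ∀ (interval : Int) (omit_one : Bool), Dom_convert_sec_to_interval interval omit_one → Spec_convert_sec_to_interval interval omit_one (convert_sec_to_interval interval omit_one)

-- ===== LEMMAS AND PROOFS =====

lemma pvDigitChar_star (m : Nat) (h : ¬ m < 16) : Nat.digitChar m = '*' := by
  unfold Nat.digitChar
  repeat rw [if_neg (by omega)]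

lemma pvDigitChar_ne_space (m : Nat) : Nat.digitChar m ≠ ' ' := by
  by_cases h : m < 16
  · interval_cases m <;> decide
  · rw [pvDigitChar_star m h]; decide

lemma pvDigitChar_eq_one (m : Nat) (h : Nat.digitChar m = '1') : m = 1 := by
  by_cases hlt : m < 16
  · interval_cases m <;> first | rfl | exact absurd h (by decide)
  · rw [pvDigitChar_star m hlt] at h
    exact absurd h (by decide)

lemma pvToDigitsCore_append (b : Nat) : ∀ (f n : Nat) (acc : List Char),
    Nat.toDigitsCore b f n acc = Nat.toDigitsCore b f n [] ++ acc := by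
  intro f
  induction f with
  | zero => intro n acc; simp [Nat.toDigitsCore]
  | succ f ih =>
    intro n acc
    rw [Nat.toDigitsCore, Nat.toDigitsCore]
    by_cases h : n / b = 0
    · simp [h]
    · simp only [h, if_false]
      rw [ih (n / b) [(n % b).digitChar], ih (n / b) ((n % b).digitChar :: acc)]
      simp

lemma pvToDigitsCore_ne_space (b : Nat) : ∀ (f n : Nat) (acc : List Char),
    (∀ c ∈ acc, c ≠ ' ') → ∀ c ∈ Nat.toDigitsCore b f n acc, c ≠ ' ' := by
  intro f
  induction f with
  | zero => intro n acc hacc; simpa [Nat.toDigitsCore] using hacc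
  | succ f ih =>
    intro n acc hacc c hc
    rw [Nat.toDigitsCore] at hc
    by_cases h : n / b = 0
    · simp only [h] at hc
      rcases List.mem_cons.mp hc with h1 | h1
      · subst h1; exact pvDigitChar_ne_space _
      · exact hacc _ h1
    · rw [if_neg h] at hc
      refine ih (n / b) ((n % b).digitChar :: acc) ?_ c hc
      intro x hx
      rcases List.mem_cons.mp hx with h1 | h1
      · subst h1; exact pvDigitChar_ne_space _
      · exact hacc _ h1

lemma pvToDigitsCore_ne_nil (b f n : Nat) (acc : List Char) (hf : f ≠ 0) :
    Nat.toDigitsCore b f n acc ≠ [] := by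
  cases f with
  | zero => exact absurd rfl hf
  | succ f =>
    rw [Nat.toDigitsCore]
    by_cases h : n / b = 0
    · simp [h]
    · rw [if_neg h, pvToDigitsCore_append]
      simp

lemma pvToDigits_eq_one (n : Nat) (h : Nat.toDigits 10 n = ['1']) : n = 1 := by
  unfold Nat.toDigits at h
  rw [Nat.toDigitsCore] at h
  by_cases h0 : n / 10 = 0
  · simp only [h0] at h
    have h1 : Nat.digitChar (n % 10) = '1' := by
      simpa using h
    have := pvDigitChar_eq_one _ h1
    omega
  · rw [if_neg h0, pvToDigitsCore_append] at h
    have hne := pvToDigitsCore_ne_nil 10 n (n / 10) [] (by omega)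
    have hlen := congrArg List.length h
    simp only [List.length_append, List.length_cons, List.length_nil] at hlen
    exact absurd (List.length_eq_zero_iff.mp (by omega)) hne

lemma pvSpace_not_mem_toChars (v : Int) : ' ' ∉ PySem.Int.toChars v := by
  unfold PySem.Int.toChars Nat.toDigits
  split_ifs with h
  · intro hm
    rcases List.mem_cons.mp hm with h1 | h1
    · exact absurd h1 (by decide)
    · exact pvToDigitsCore_ne_space 10 _ _ [] (by simp) _ h1 rfl
  · intro hm
    exact pvToDigitsCore_ne_space 10 _ _ [] (by simp) _ hm rfl

lemma pvToChars_eq_one (v : Int) (h : PySem.Int.toChars v = ['1']) : v = 1 := by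
  unfold PySem.Int.toChars at h
  split_ifs at h with hv
  · simp at h
  · have := pvToDigits_eq_one _ h
    omega

lemma pvStarts1 (v : Int) (rest : List Char) :
    PySem.Chars.startswith (PySem.Int.toChars v ++ ' ' :: rest) ['1', ' '] = decide (v = 1) := by
  by_cases hv : v = 1
  · subst hv
    have h1 : PySem.Int.toChars 1 = ['1'] := by decide
    rw [h1, show (decide ((1:Int) = 1)) = true from by decide, PySem.Chars.startswith_iff]
    exact ⟨rest, by simp⟩
  · have hnp : ¬ (['1', ' '] <+: PySem.Int.toChars v ++ ' ' :: rest) := by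
      rintro ⟨t, ht⟩
      rcases hL : PySem.Int.toChars v with _ | ⟨c1, _ | ⟨c2, tl⟩⟩ <;> rw [hL] at ht
      · simp at ht
      · simp at ht
        exact hv (pvToChars_eq_one v (by rw [hL, ← ht.1]))
      · simp at ht
        exact pvSpace_not_mem_toChars v (by rw [hL, ← ht.2.1]; simp)
    simp only [hv, decide_false]
    rw [Bool.eq_false_iff, Ne, PySem.Chars.startswith_iff]
    exact hnp

def pvFix (o : Bool) (p : String) : String :=
  if o = true then (if PySem.Str.startswith p "1 " = true then PySem.Str.replace p "1 " "" else p) else p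

lemma pvMapFix (o : Bool) (l : List String) :
    (if o = true then
        l.map (fun p => if PySem.Str.startswith p "1 " = true then PySem.Str.replace p "1 " "" else p)
      else l) = l.map (pvFix o) := by
  cases o with
  | false =>
    have hf : pvFix false = fun p => p := funext fun p => rfl
    simp [hf]
  | true =>
    have hf : pvFix true
        = fun p => (if PySem.Str.startswith p "1 " = true then PySem.Str.replace p "1 " "" else p) :=
      funext fun p => rfl
    simp [hf]

lemma pvPart_eq (o : Bool) (v : Int) (name sname : String)
    (hs : sname.toList = ' ' :: name.toList)
    (hrep : PySem.Str.replace (PySem.Int.toStr 1 ++ sname ++ "") "1 " "" = name) :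
    pvFix o (PySem.Int.toStr v ++ sname ++ (if v ≠ 1 then "s" else "")) = pvFmt v name o := by
  unfold pvFix
  by_cases hv : v = 1
  · subst hv
    rw [show (if (1:Int) ≠ 1 then "s" else "") = "" from by simp]
    have hsw : PySem.Str.startswith (PySem.Int.toStr 1 ++ sname ++ "") "1 " = true := by
      rw [PySem.Str.startswith_eq, PySem.Chars.startswith_iff]
      refine ⟨name.toList, ?_⟩
      simp [hs, PySem.Int.toList_toStr, show PySem.Int.toChars 1 = ['1'] from by decide]
    rw [hsw, if_pos rfl]
    rw [pvFmt, if_pos rfl]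
    cases o with
    | true => simpa using hrep
    | false =>
      simp only [Bool.false_eq_true, if_false]
      refine String.toList_inj.mp ?_
      simp [hs, PySem.Int.toList_toStr, show PySem.Int.toChars 1 = ['1'] from by decide]
  · rw [show (if v ≠ 1 then "s" else "") = "s" from by simp [hv]]
    have hP : (PySem.Int.toStr v ++ sname ++ "s").toList
        = PySem.Int.toChars v ++ ' ' :: (name.toList ++ ['s']) := by
      simp [hs, PySem.Int.toList_toStr]
    have hsw : PySem.Str.startswith (PySem.Int.toStr v ++ sname ++ "s") "1 " = false := by
      rw [PySem.Str.startswith_eq, hP, show ("1 " : String).toList = ['1', ' '] from rfl,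
        pvStarts1]
      simp [hv]
    rw [hsw]
    simp only [Bool.false_eq_true, if_false, ite_self]
    rw [pvFmt, if_neg hv]
    refine String.toList_inj.mp ?_
    simp [hs, PySem.Int.toList_toStr]

set_option maxHeartbeats 2000000 in
lemma pvMain (interval : Int) (o : Bool) :
    convert_sec_to_interval interval o = convert_sec_to_interval_alt interval o := by
  unfold convert_sec_to_interval convert_sec_to_interval_alt pvRatios
  simp only [pvGo]
  rw [pvMapFix]
  set d := PySem.Int.floordiv interval 86400 with hd
  set hr := PySem.Int.floordiv (PySem.Int.mod interval 86400) 3600 with hh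
  set mn := PySem.Int.floordiv (PySem.Int.mod (PySem.Int.mod interval 86400) 3600) 60 with hm
  set sc := PySem.Int.mod (PySem.Int.mod (PySem.Int.mod interval 86400) 3600) 60 with hsc
  have e60 : ∀ a : Int, PySem.Int.mod a 60 = a % 60 := fun a => PySem.Int.mod_eq_emod_of_pos (by omega)
  have e24 : ∀ a : Int, PySem.Int.mod a 24 = a % 24 := fun a => PySem.Int.mod_eq_emod_of_pos (by omega)
  have q60 : ∀ a : Int, PySem.Int.floordiv a 60 = a / 60 := fun a => PySem.Int.floordiv_eq_ediv_of_pos (by omega)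
  have q24 : ∀ a : Int, PySem.Int.floordiv a 24 = a / 24 := fun a => PySem.Int.floordiv_eq_ediv_of_pos (by omega)
  have esc : PySem.Int.mod interval 60 = sc := by
    rw [hsc, e60, e60,
      PySem.Int.mod_eq_emod_of_pos (by omega),
      PySem.Int.mod_eq_emod_of_pos (by omega)]
    omega
  have emn : PySem.Int.mod (PySem.Int.floordiv interval 60) 60 = mn := by
    rw [hm, e60, q60,
      PySem.Int.floordiv_eq_ediv_of_pos (by omega),
      PySem.Int.mod_eq_emod_of_pos (by omega),
      PySem.Int.mod_eq_emod_of_pos (by omega)]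
    omega
  have ehr : PySem.Int.mod (PySem.Int.floordiv (PySem.Int.floordiv interval 60) 60) 24 = hr := by
    rw [hh, e24, q60, q60,
      PySem.Int.floordiv_eq_ediv_of_pos (by omega),
      PySem.Int.mod_eq_emod_of_pos (by omega)]
    omega
  have edy : PySem.Int.floordiv (PySem.Int.floordiv (PySem.Int.floordiv interval 60) 60) 24 = d := by
    rw [hd, q24, q60, q60, PySem.Int.floordiv_eq_ediv_of_pos (by omega)]
    omega
  rw [esc, emn, ehr, edy]
  have pd := pvPart_eq o d "day" " day" (by decide) (by decide)
  have ph := pvPart_eq o hr "hour" " hour" (by decide) (by decide)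
  have pm := pvPart_eq o mn "minute" " minute" (by decide) (by decide)
  have ps := pvPart_eq o sc "second" " second" (by decide) (by decide)
  simp only [apply_ite (List.map (pvFix o)), List.map_append, List.map_cons, List.map_nil]
  rw [pd, ph, pm, ps]
  by_cases h1 : d = 0 <;> by_cases h2 : hr = 0 <;> by_cases h3 : mn = 0 <;> by_cases h4 : sc = 0 <;>
    simp [h1, h2, h3, h4, pvFmt, PySem.Str.join]
  · decide

-- ===== VERDICT (by name: the statement is the Claim_ definition above) =====
theorem convert_sec_to_interval_spec : Claim_equal_convert_sec_to_interval := by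
  intro interval o _
  unfold Spec_convert_sec_to_interval
  exact pvMain interval o
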